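-- pv_equiv track=rewrite | github.com/roamingmonk/Redstone | utils/tiled_loader.py | is_walkable_tile
-- ===== SOURCE A (Python) =====
-- def is_walkable_tile(tile_name, walkable_tiles):
--     """
--     Check if a tile is walkable
--
--     Args:
--         tile_name: Name of the tile
--         walkable_tiles: List of walkable tile names
--
--     Returns:
--         True if walkable, False otherwise
--     """
--     if tile_name is None:
--         return False
--
--     # Direct match
--     if tile_name in walkable_tiles:
--         return True
--
--     # Prefix match (e.g., 'grass_light' matches 'grass')
--     for walkable in walkable_tiles:
--         if tile_name.startswith(walkable + '_'):
--             return True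
--
--     return False
-- ===== SOURCE B (Python) =====
-- def is_walkable_tile(tile_name, walkable_tiles):
--     if tile_name is None:
--         return False
--     ws = set(walkable_tiles)
--     # Direct match
--     if tile_name in ws:
--         return True
--     # Prefix match: check each underscore position instead of each walkable tile
--     for i in range(len(tile_name)):
--         if tile_name[i] == '_' and tile_name[:i] in ws:
--             return True
--     return False
-- ===== Notes on version B (the rewrite author's own statement) =====
-- stated objective: alternative
-- what changed: Instead of scanning the walkable list with startswith for each entry, B builds a set of walkable names once and scans the underscore positions of tile_name, testing each prefix against the set.
import Mathlib
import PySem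

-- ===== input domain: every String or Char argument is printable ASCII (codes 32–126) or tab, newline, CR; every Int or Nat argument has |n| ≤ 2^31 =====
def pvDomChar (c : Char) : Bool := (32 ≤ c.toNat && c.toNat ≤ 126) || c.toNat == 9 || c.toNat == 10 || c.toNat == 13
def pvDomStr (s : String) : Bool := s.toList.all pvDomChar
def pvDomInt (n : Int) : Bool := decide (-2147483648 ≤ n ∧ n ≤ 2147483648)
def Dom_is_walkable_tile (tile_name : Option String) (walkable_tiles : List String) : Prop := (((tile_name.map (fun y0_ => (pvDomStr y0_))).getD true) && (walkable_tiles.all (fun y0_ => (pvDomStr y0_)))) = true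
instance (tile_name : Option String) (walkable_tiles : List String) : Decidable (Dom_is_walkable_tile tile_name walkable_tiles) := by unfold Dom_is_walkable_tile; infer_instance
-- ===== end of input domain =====

-- B replaces A's per-tile startswith scan by one set of walkable names plus a scan of
-- tile_name's underscore positions, testing each prefix against the set (alternative algorithm).


-- ===== PORT A =====
def is_walkable_tile (tile_name : Option String) (walkable_tiles : List String) : Bool :=
  match tile_name with
  | none => false
  | some s =>
    if walkable_tiles.contains s then true
    else walkable_tiles.any (fun w => PySem.Str.startswith s (w ++ "_"))

-- ===== PORT B =====
-- 'range(len(tile_name))' yields the nonnegative indices 0..len-1, exactly List.range;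
-- tile_name[i] on such i is s.toList[i]?, tile_name[:i] is the take-i prefix (PySem.List.slice_to_natCast).
def is_walkable_tile_alt (tile_name : Option String) (walkable_tiles : List String) : Bool :=
  match tile_name with
  | none => false
  | some s =>
    let ws : PySem.Set String := PySem.Set.ofList walkable_tiles
    if ws.contains s then true
    else (List.range s.toList.length).any (fun i =>
      (s.toList[i]? == some '_') && ws.contains (String.ofList (s.toList.take i)))

-- ===== PRECONDITION & SPEC =====
def Spec_is_walkable_tile (tile_name : Option String) (walkable_tiles : List String) (out : Bool) : Prop := out = is_walkable_tile_alt tile_name walkable_tiles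
instance (tile_name : Option String) (walkable_tiles : List String) (out : Bool) : Decidable (Spec_is_walkable_tile tile_name walkable_tiles out) := by unfold Spec_is_walkable_tile; infer_instance

-- ===== CLAIM (what is proved, stated in full; the proofs are below) =====
def Claim_equal_is_walkable_tile : Prop := ∀ (tile_name : Option String) (walkable_tiles : List String), Dom_is_walkable_tile tile_name walkable_tiles → Spec_is_walkable_tile tile_name walkable_tiles (is_walkable_tile tile_name walkable_tiles)

-- ===== LEMMAS AND PROOFS =====

-- The two prefix scans find the same thing: some walkable+'_' is a prefix of l iff some
-- underscore position i of l has its take-i prefix among the walkable names.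
theorem prefix_scan (l : List Char) (ts : List String) :
    (∃ w ∈ ts, w.toList ++ ['_'] <+: l) ↔
      (∃ i < l.length, l[i]? = some '_' ∧ String.ofList (l.take i) ∈ ts) := by
  constructor
  · rintro ⟨w, hw, hpre⟩
    have hlen : w.toList.length + 1 ≤ l.length := by
      have := hpre.length_le; simpa using this
    refine ⟨w.toList.length, by omega, ?_, ?_⟩
    · have h := List.IsPrefix.getElem hpre (i := w.toList.length) (by simp)
      simp at h
      rw [List.getElem?_eq_getElem (by omega)]
      simp [← h]
    · have hp2 : w.toList <+: l := (List.prefix_append _ _).trans hpre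
      rw [← List.prefix_iff_eq_take.mp hp2]
      simpa using hw
  · rintro ⟨i, hi, hc, hmem⟩
    refine ⟨String.ofList (l.take i), hmem, ?_⟩
    have ht : (String.ofList (l.take i)).toList = l.take i := by simp
    rw [ht]
    have : l.take i ++ ['_'] = l.take (i + 1) := by
      rw [List.take_add_one, List.getElem?_eq_getElem hi] at *
      simp at hc
      simp [hc]
    rw [this]
    exact List.take_prefix (i + 1) l

-- membership in set(walkable_tiles) is membership in walkable_tiles
theorem contains_ofList (ts : List String) (x : String) :
    (PySem.Set.ofList ts).contains x = ts.contains x := by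
  simp [PySem.Set.mem_ofList]

-- transfer prefix_scan to the two Bool scans of the ports
theorem any_scan_eq (s : String) (ts : List String) :
    ts.any (fun w => PySem.Str.startswith s (w ++ "_")) =
      (List.range s.toList.length).any (fun i =>
        (s.toList[i]? == some '_') && (PySem.Set.ofList ts).contains (String.ofList (s.toList.take i))) := by
  apply Bool.eq_iff_iff.mpr
  simp only [List.any_eq_true, List.mem_range, Bool.and_eq_true, beq_iff_eq,
    PySem.Str.startswith_eq, PySem.Chars.startswith_iff, String.toList_append,
    contains_ofList, List.contains_iff_mem]
  exact prefix_scan s.toList ts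

-- ===== VERDICT (by name: the statement is the Claim_ definition above) =====
theorem is_walkable_tile_spec : Claim_equal_is_walkable_tile := by
  intro tile_name walkable_tiles _
  unfold Spec_is_walkable_tile is_walkable_tile is_walkable_tile_alt
  cases tile_name with
  | none => rfl
  | some s =>
    simp only [contains_ofList, any_scan_eq]
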